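-- pv_equiv track=rewrite | github.com/RiteshF7/zunoapp | backend/scripts/resolve_env.py | _env_to_output
-- ===== SOURCE A (Python) =====
-- def _env_to_output(env: dict[str, str]) -> str:
--     lines = []
--     order = [
--         "SUPABASE_URL", "SUPABASE_SERVICE_ROLE_KEY", "SUPABASE_JWT_SECRET",
--         "SUPABASE_DB_PASSWORD_DEV", "SUPABASE_DB_PASSWORD_PROD",
--         "GCP_PROJECT_ID", "GCP_LOCATION", "GCP_CREDENTIALS_JSON",
--         "VERTEX_EMBEDDING_MODEL", "VERTEX_LLM_MODEL",
--         "RAG_CHUNK_SIZE", "RAG_CHUNK_OVERLAP", "RAG_TOP_K",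
--         "BACKEND_PORT", "ENVIRONMENT", "CORS_ORIGINS",
--     ]
--     seen = set()
--     for k in order:
--         if k in env and k not in seen:
--             seen.add(k)
--             lines.append(f"{k}={env[k]}")
--     for k, v in sorted(env.items()):
--         if k not in seen:
--             lines.append(f"{k}={v}")
--     return "\n".join(lines)
-- ===== SOURCE B (Python) =====
-- def _env_to_output(env: dict[str, str]) -> str:
--     order = [
--         "SUPABASE_URL", "SUPABASE_SERVICE_ROLE_KEY", "SUPABASE_JWT_SECRET",
--         "SUPABASE_DB_PASSWORD_DEV", "SUPABASE_DB_PASSWORD_PROD",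
--         "GCP_PROJECT_ID", "GCP_LOCATION", "GCP_CREDENTIALS_JSON",
--         "VERTEX_EMBEDDING_MODEL", "VERTEX_LLM_MODEL",
--         "RAG_CHUNK_SIZE", "RAG_CHUNK_OVERLAP", "RAG_TOP_K",
--         "BACKEND_PORT", "ENVIRONMENT", "CORS_ORIGINS",
--     ]
--     rank = {k: i for i, k in enumerate(order)}
--     return "\n".join(
--         f"{k}={v}"
--         for k, v in sorted(env.items(), key=lambda kv: (rank.get(kv[0], len(order)), kv[0]))
--     )
-- ===== Notes on version B (the rewrite author's own statement) =====
-- stated objective: simpler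
-- what changed: A's two explicit passes (a fixed-order loop maintaining a `seen` set, then a loop over sorted(env.items()) skipping seen keys) are replaced by a single sorted() call whose rank-tuple key (rank.get(k, len(order)), k) puts the known keys first in fixed order and the remaining keys after them in alphabetical order; Pre_ only requires distinct keys, which every Python dict argument has by construction.
import Mathlib
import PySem

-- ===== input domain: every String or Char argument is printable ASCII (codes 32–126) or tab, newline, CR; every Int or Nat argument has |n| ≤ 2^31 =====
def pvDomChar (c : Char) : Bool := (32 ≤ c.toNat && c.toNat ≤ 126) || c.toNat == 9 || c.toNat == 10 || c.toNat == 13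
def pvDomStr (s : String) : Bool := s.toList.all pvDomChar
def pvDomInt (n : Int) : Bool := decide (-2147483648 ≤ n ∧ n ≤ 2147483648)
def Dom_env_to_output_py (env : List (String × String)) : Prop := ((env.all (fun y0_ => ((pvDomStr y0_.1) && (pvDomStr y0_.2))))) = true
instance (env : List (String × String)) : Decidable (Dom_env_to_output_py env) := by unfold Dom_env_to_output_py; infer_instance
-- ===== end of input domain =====

-- B replaces A's two explicit loops (fixed-order pass with a `seen` set, then a sorted pass
-- over the leftovers) by ONE sorted() call with a rank-tuple key. Objective: simpler.

-- ===== PORT A =====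
-- the fixed `order` list (a literal of both Pythons)
def pvOrder : List String :=
  ["SUPABASE_URL", "SUPABASE_SERVICE_ROLE_KEY", "SUPABASE_JWT_SECRET",
   "SUPABASE_DB_PASSWORD_DEV", "SUPABASE_DB_PASSWORD_PROD",
   "GCP_PROJECT_ID", "GCP_LOCATION", "GCP_CREDENTIALS_JSON",
   "VERTEX_EMBEDDING_MODEL", "VERTEX_LLM_MODEL",
   "RAG_CHUNK_SIZE", "RAG_CHUNK_OVERLAP", "RAG_TOP_K",
   "BACKEND_PORT", "ENVIRONMENT", "CORS_ORIGINS"]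

def env_to_output_py (env : List (String × String)) : String :=
  let d : PySem.Dict String String := PySem.Dict.mk env
  -- for k in order: if k in env and k not in seen: seen.add(k); lines.append(f"{k}={env[k]}")
  let st := pvOrder.foldl (fun (st : List String × PySem.Set String) k =>
      if d.contains k && !(PySem.Set.contains st.2 k) then
        (st.1 ++ [k ++ "=" ++ d.getD k ""], PySem.Set.add st.2 k)
      else st) ([], PySem.Set.empty)
  -- for k, v in sorted(env.items()): if k not in seen: lines.append(f"{k}={v}")
  let lines := (PySem.List.sorted2 d.items (fun p => p.1) (fun p => p.2)).foldl
      (fun lines p => if !(PySem.Set.contains st.2 p.1) then lines ++ [p.1 ++ "=" ++ p.2] else lines)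
      st.1
  PySem.Str.join "\n" lines

-- ===== PORT B =====
-- rank = {k: i for i, k in enumerate(order)}
def pvRank : PySem.Dict String Int :=
  (PySem.List.enumerate pvOrder).foldl (fun r p => r.insert p.2 p.1) PySem.Dict.empty

-- "\n".join(f"{k}={v}" for k, v in sorted(env.items(), key=lambda kv: (rank.get(kv[0], len(order)), kv[0])))
def env_to_output_py_alt (env : List (String × String)) : String :=
  PySem.Str.join "\n"
    ((PySem.List.sorted2 env
        (fun p => pvRank.getD p.1 (PySem.List.len pvOrder)) (fun p => p.1)).map
      (fun p => p.1 ++ "=" ++ p.2))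

-- ===== PRECONDITION & SPEC =====
-- Pre_ only requires distinct keys: `env` is a Python dict, whose keys are distinct by
-- construction, so association lists with duplicate keys represent no input A can receive.
def Pre_env_to_output_py (env : List (String × String)) : Prop := (env.map Prod.fst).Nodup
instance (env : List (String × String)) : Decidable (Pre_env_to_output_py env) := by
  unfold Pre_env_to_output_py; infer_instance

def pvWitness_env_to_output_py : (List (String × String)) :=
  [("ZZZ", "9"), ("SUPABASE_URL", "u"), ("ENVIRONMENT", "dev")]

def Spec_env_to_output_py (env : List (String × String)) (out : String) : Prop := out = env_to_output_py_alt env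
instance (env : List (String × String)) (out : String) : Decidable (Spec_env_to_output_py env out) := by unfold Spec_env_to_output_py; infer_instance

-- ===== CLAIM (what is proved, stated in full; the proofs are below) =====
def Claim_equal_env_to_output_py : Prop := ∀ (env : List (String × String)), Dom_env_to_output_py env → Pre_env_to_output_py env → Spec_env_to_output_py env (env_to_output_py env)

-- ===== LEMMAS AND PROOFS =====

-- sorted2 is sorted by the lexicographic product key (names Python's tuple-key sort)
theorem pv_sorted2_eq_sorted_lex {α κ₁ κ₂ : Type} [LinearOrder κ₁] [LinearOrder κ₂]
    (xs : List α) (k1 : α → κ₁) (k2 : α → κ₂) :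
    PySem.List.sorted2 xs k1 k2 = PySem.List.sorted xs (fun x => toLex (k1 x, k2 x)) := by
  have hb : (fun (a b : α) => decide (k1 a < k1 b) || (!decide (k1 b < k1 a) && decide (k2 a < k2 b)))
      = fun (a b : α) => decide (toLex (k1 a, k2 a) < toLex (k1 b, k2 b)) := by
    funext a b
    rcases lt_trichotomy (k1 a) (k1 b) with h | h | h
    · simp [Prod.Lex.lt_iff, h]
    · simp [Prod.Lex.lt_iff, h]
    · simp [Prod.Lex.lt_iff, h, lt_asymm h, h.ne']
  unfold PySem.List.sorted2 PySem.List.sorted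
  simp only [Bool.false_eq_true, if_false]
  rw [hb]

-- Set.contains as a decidable membership test
theorem pv_set_contains_eq (s : PySem.Set String) (x : String) :
    PySem.Set.contains s x = decide (x ∈ s) := by
  by_cases hx : x ∈ s
  · simp [hx]
  · simp only [hx, decide_false]
    by_contra hc
    exact hx ((PySem.Set.contains_iff s x).1 (by
      cases h : PySem.Set.contains s x
      · exact absurd h hc
      · rfl))

-- the first loop of A, over a key list with no duplicates not yet seen
theorem pv_loop1 (d : PySem.Dict String String) (os : List String) :
    ∀ (ls : List String) (seen : PySem.Set String), os.Nodup → (∀ k ∈ os, k ∉ seen) →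
    os.foldl (fun (st : List String × PySem.Set String) k =>
        if d.contains k && !(PySem.Set.contains st.2 k) then
          (st.1 ++ [k ++ "=" ++ d.getD k ""], PySem.Set.add st.2 k)
        else st) (ls, seen)
      = (ls ++ (os.filter (fun k => d.contains k)).map (fun k => k ++ "=" ++ d.getD k ""),
         seen ++ os.filter (fun k => d.contains k)) := by
  induction os with
  | nil => intro ls seen _ _; simp
  | cons k os ih =>
    intro ls seen hnd hdisj
    have hk : k ∉ seen := hdisj k (by simp)
    have hkc : PySem.Set.contains seen k = false := by
      rw [pv_set_contains_eq]; simp [hk]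
    have hadd : PySem.Set.add seen k = seen ++ [k] := by
      simp [PySem.Set.add, hk]
    simp only [List.foldl_cons]
    by_cases hc : d.contains k = true
    · rw [if_pos (by simp [hc, hk]), hadd,
        ih (ls ++ [k ++ "=" ++ d.getD k ""]) (seen ++ [k]) hnd.of_cons
          (by
            intro j hj
            simp only [List.mem_append, List.mem_singleton]
            rintro (h | rfl)
            · exact hdisj j (by simp [hj]) h
            · exact (List.nodup_cons.1 hnd).1 hj)]
      simp [hc, List.append_assoc]
    · rw [if_neg (by simp [hc]),
        ih ls seen hnd.of_cons (fun j hj => hdisj j (by simp [hj]))]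
      simp [hc]

-- facts about the fixed order list and the rank dict
theorem pv_order_nodup : pvOrder.Nodup := by decide
theorem pv_rank_lt : ∀ k ∈ pvOrder,
    pvRank.getD k (PySem.List.len pvOrder) < PySem.List.len pvOrder := by decide
theorem pv_rank_mono : pvOrder.Pairwise
    (fun a b => pvRank.getD a (PySem.List.len pvOrder) < pvRank.getD b (PySem.List.len pvOrder)) := by
  decide
theorem pv_rank_keys : pvRank.keys = pvOrder := by decide
theorem pv_rank_of_not_mem (k : String) (hk : k ∉ pvOrder) :
    pvRank.getD k (PySem.List.len pvOrder) = PySem.List.len pvOrder := by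
  have h0 : pvRank.get? k = none := by
    rw [PySem.Dict.get?_eq_none_iff_not_mem_keys, pv_rank_keys]; exact hk
  simp [PySem.Dict.getD, h0]

-- membership in a dict with nodup keys
theorem pv_mem_iff (env : List (String × String)) (h : (env.map Prod.fst).Nodup)
    (p : String × String) :
    p ∈ env ↔ (PySem.Dict.mk env).get? p.1 = some p.2 := by
  have hk : (PySem.Dict.mk env).keys.Nodup := by simpa [PySem.Dict.keys] using h
  rw [PySem.Dict.get?_eq_some_iff_mem_items _ _ _ hk]

theorem pv_contains_of_mem (env : List (String × String)) (p : String × String)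
    (hp : p ∈ env) : (PySem.Dict.mk env).contains p.1 = true := by
  simp only [PySem.Dict.contains, List.any_eq_true]
  exact ⟨p, hp, by simp⟩

-- the one real theorem: A's concatenated line sequence IS the single rank-keyed sort
theorem pv_main (env : List (String × String)) (h : (env.map Prod.fst).Nodup) :
    ((pvOrder.filter (fun k => (PySem.Dict.mk env).contains k)).map
        (fun k => (k, (PySem.Dict.mk env).getD k "")))
      ++ (PySem.List.sorted2 env (fun p => p.1) (fun p => p.2)).filter
          (fun p => !decide (p.1 ∈ pvOrder.filter (fun k => (PySem.Dict.mk env).contains k)))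
    = PySem.List.sorted env
        (fun p => toLex (pvRank.getD p.1 (PySem.List.len pvOrder), p.1)) := by
  have henv : env.Nodup := h.of_map
  -- the second-loop filter predicate, on members of env, is just "key not in order"
  have hfiltmem : ∀ p ∈ env,
      (!decide (p.1 ∈ pvOrder.filter (fun k => (PySem.Dict.mk env).contains k)))
        = !decide (p.1 ∈ pvOrder) := by
    intro p hp
    have hcn := pv_contains_of_mem env p hp
    have hiff : (p.1 ∈ pvOrder.filter (fun k => (PySem.Dict.mk env).contains k))
        ↔ p.1 ∈ pvOrder := by
      rw [List.mem_filter]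
      exact ⟨fun h' => h'.1, fun h' => ⟨h', hcn⟩⟩
    rw [decide_eq_decide.mpr hiff]
  -- the known part is a permutation of the in-order entries of env
  have hknown : ((pvOrder.filter (fun k => (PySem.Dict.mk env).contains k)).map
      (fun k => (k, (PySem.Dict.mk env).getD k ""))).Perm
      (env.filter (fun p => decide (p.1 ∈ pvOrder))) := by
    rw [List.perm_ext_iff_of_nodup]
    · intro a
      simp only [List.mem_map, List.mem_filter, decide_eq_true_eq]
      constructor
      · rintro ⟨k, ⟨hko, hkc⟩, rfl⟩
        refine ⟨?_, hko⟩
        rw [pv_mem_iff env h]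
        have hs : ((PySem.Dict.mk env).get? k).isSome := by
          rw [← PySem.Dict.contains_eq_isSome_get?]; exact hkc
        obtain ⟨v, hv⟩ := Option.isSome_iff_exists.1 hs
        simp [PySem.Dict.getD, hv]
      · rintro ⟨ha, hao⟩
        have hget := (pv_mem_iff env h a).1 ha
        refine ⟨a.1, ⟨hao, pv_contains_of_mem env a ha⟩, ?_⟩
        have hgd : (PySem.Dict.mk env).getD a.1 "" = a.2 := by
          simp [PySem.Dict.getD, hget]
        rw [hgd]
    · exact (pv_order_nodup.filter _).map (fun a b hab => congrArg Prod.fst hab)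
    · exact henv.filter _
  -- the sorted leftover part is a permutation of the out-of-order entries of env
  have hsortperm : ((PySem.List.sorted2 env (fun p => p.1) (fun p => p.2)).filter
      (fun p => !decide (p.1 ∈ pvOrder.filter (fun k => (PySem.Dict.mk env).contains k)))).Perm
      (env.filter (fun p => !decide (p.1 ∈ pvOrder))) := by
    refine ((PySem.List.sorted2_perm env (fun p => p.1) (fun p => p.2) false).filter _).trans ?_
    rw [List.filter_congr hfiltmem]
  symm
  apply PySem.List.sorted_eq_of_perm_of_pairwise_lt
  · exact (hknown.append hsortperm).trans
      (List.filter_append_perm (fun p => decide (p.1 ∈ pvOrder)) env)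
  · rw [List.pairwise_append]
    refine ⟨?_, ?_, ?_⟩
    · -- within the known part: rank strictly increases along pvOrder
      refine List.Pairwise.map _ ?_ (pv_rank_mono.filter _)
      intro a b hab
      rw [Prod.Lex.lt_iff]
      exact Or.inl hab
    · -- within the leftovers: equal rank (= len order), keys strictly increase
      rw [pv_sorted2_eq_sorted_lex] at hsortperm ⊢
      have hpw := (PySem.List.sorted_pairwise env (fun p => toLex (p.1, p.2))).filter
        (fun p => !decide (p.1 ∈ pvOrder.filter (fun k => (PySem.Dict.mk env).contains k)))
      have hnodup : ((PySem.List.sorted env (fun p => toLex (p.1, p.2))).filter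
          (fun p => !decide (p.1 ∈ pvOrder.filter (fun k => (PySem.Dict.mk env).contains k)))).Pairwise
          (fun a b => a.1 ≠ b.1) := by
        have hnd : (((PySem.List.sorted env (fun p => toLex (p.1, p.2))).filter
            (fun p => !decide (p.1 ∈ pvOrder.filter
              (fun k => (PySem.Dict.mk env).contains k)))).map Prod.fst).Nodup := by
          refine (hsortperm.map Prod.fst).nodup_iff.2 ?_
          exact h.sublist ((env.filter_sublist).map Prod.fst)
        rw [List.nodup_iff_pairwise_ne, List.pairwise_map] at hnd
        exact hnd
      refine (hpw.and hnodup).imp_of_mem ?_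
      intro a b ha hb hab
      obtain ⟨hle, hne⟩ := hab
      have hmemA : a ∈ env := (PySem.List.sorted_perm _ _ _).subset (List.mem_filter.1 ha).1
      have hmemB : b ∈ env := (PySem.List.sorted_perm _ _ _).subset (List.mem_filter.1 hb).1
      have hna : a.1 ∉ pvOrder := by
        have hfa := (List.mem_filter.1 ha).2
        rw [hfiltmem a hmemA] at hfa
        simpa using hfa
      have hnb : b.1 ∉ pvOrder := by
        have hfb := (List.mem_filter.1 hb).2
        rw [hfiltmem b hmemB] at hfb
        simpa using hfb
      have h1 : a.1 < b.1 := by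
        rcases Prod.Lex.le_iff.1 hle with h' | ⟨h', _⟩
        · exact h'
        · exact absurd h' hne
      rw [Prod.Lex.lt_iff]
      right
      refine ⟨?_, ?_⟩
      · rw [pv_rank_of_not_mem a.1 hna, pv_rank_of_not_mem b.1 hnb]
        exact rfl
      · exact h1
    · -- across: every known key ranks strictly below every unknown key
      intro a ha b hb
      obtain ⟨k, hk, rfl⟩ := List.mem_map.1 ha
      have hko := (List.mem_filter.1 hk).1
      have hmemB : b ∈ env :=
        (PySem.List.sorted2_perm _ _ _ _).subset (List.mem_filter.1 hb).1
      have hnb : b.1 ∉ pvOrder := by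
        have hfb := (List.mem_filter.1 hb).2
        rw [hfiltmem b hmemB] at hfb
        simpa using hfb
      rw [Prod.Lex.lt_iff]
      left
      rw [pv_rank_of_not_mem b.1 hnb]
      exact pv_rank_lt k hko

-- ===== VERDICT (by name: the statement is the Claim_ definition above) =====
theorem env_to_output_py_spec : Claim_equal_env_to_output_py := by
  intro env _ hpre
  unfold Spec_env_to_output_py env_to_output_py env_to_output_py_alt
  simp only []
  rw [pv_loop1 (PySem.Dict.mk env) pvOrder [] PySem.Set.empty pv_order_nodup
    (by intro k _ hk; exact absurd hk (List.not_mem_nil))]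
  dsimp only
  rw [PySem.List.foldl_append_if]
  have hfc : ∀ p ∈ (PySem.List.sorted2 env (fun p => p.1) (fun p => p.2)),
      (!(PySem.Set.contains
          (PySem.Set.empty ++ pvOrder.filter (fun k => (PySem.Dict.mk env).contains k)) p.1))
    = (!decide (p.1 ∈ pvOrder.filter (fun k => (PySem.Dict.mk env).contains k))) := by
    intro p _
    rw [pv_set_contains_eq]
    simp [PySem.Set.empty]
  rw [List.filter_congr hfc]
  have hmapm : (pvOrder.filter (fun k => (PySem.Dict.mk env).contains k)).map
      (fun k => k ++ "=" ++ (PySem.Dict.mk env).getD k "")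
    = ((pvOrder.filter (fun k => (PySem.Dict.mk env).contains k)).map
        (fun k => (k, (PySem.Dict.mk env).getD k ""))).map
        (fun p => p.1 ++ "=" ++ p.2) := by
    rw [List.map_map]
    rfl
  rw [List.nil_append, hmapm, ← List.map_append, pv_main env hpre,
    pv_sorted2_eq_sorted_lex]
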